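-- pv_equiv track=rewrite | github.com/DimasFatchurroziq/TugasAkhirD4_Plagiarism_Task_Detector_Improvement | src/utils/rollinghash_generate.py | rollinghash_text
-- ===== SOURCE A (Python) =====
-- def rollinghash_text(ngrams_list):
--     base = 4
--     hash_list = []
--     for text in ngrams_list:
--         hash_value = 0
--         for word in text:
--             for char in word:
--                 hash_value = (hash_value * base + ord(char))
--         hash_list.append(hash_value)
--     return hash_list
-- ===== SOURCE B (Python) =====
-- def rollinghash_text(ngrams_list):
--     base = 4
--     result = []
--     for text in ngrams_list:
--         chars = [c for word in text for c in word]
--         total, weight = 0, 1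
--         for c in reversed(chars):
--             total += ord(c) * weight
--             weight *= base
--         result.append(total)
--     return result
-- ===== Notes on version B (the rewrite author's own statement) =====
-- stated objective: alternative
-- what changed: Replaces A's forward Horner accumulation (hash = hash*base + ord(c) over nested word/char loops) by flattening each text to one char list and summing ord(c)*weight back-to-front with an explicit positional-weight accumulator.
import Mathlib
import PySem

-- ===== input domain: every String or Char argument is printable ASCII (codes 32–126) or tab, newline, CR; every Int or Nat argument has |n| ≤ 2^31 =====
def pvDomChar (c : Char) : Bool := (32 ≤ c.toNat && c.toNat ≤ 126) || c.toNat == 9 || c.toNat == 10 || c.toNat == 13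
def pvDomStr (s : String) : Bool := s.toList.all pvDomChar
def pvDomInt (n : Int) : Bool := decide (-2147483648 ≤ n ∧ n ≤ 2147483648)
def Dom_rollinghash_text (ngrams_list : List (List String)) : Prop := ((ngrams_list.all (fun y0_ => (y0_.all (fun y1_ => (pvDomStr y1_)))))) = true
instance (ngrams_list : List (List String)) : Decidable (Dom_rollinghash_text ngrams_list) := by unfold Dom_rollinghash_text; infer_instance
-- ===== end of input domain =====

-- B replaces A's forward Horner accumulation (hash = hash*base + ord(c) over nested
-- word/char loops) by flattening each text to one char list and summing the explicit
-- positional-weight terms ord(c)*weight back-to-front; same values, alternative algorithm.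

-- ===== PORT A =====
def rollinghash_text (ngrams_list : List (List String)) : List Int :=
  ngrams_list.foldl (fun hash_list text =>
    hash_list ++ [text.foldl (fun hv word =>
      word.toList.foldl (fun hv c => hv * 4 + (c.toNat : Int)) hv) 0]) []

-- ===== PORT B =====
def rollinghash_text_alt (ngrams_list : List (List String)) : List Int :=
  ngrams_list.map (fun text =>
    let chars := text.flatMap String.toList
    (chars.reverse.foldl
      (fun (p : Int × Int) c => (p.1 + (c.toNat : Int) * p.2, p.2 * 4)) (0, 1)).1)

-- ===== PRECONDITION & SPEC =====
def Spec_rollinghash_text (ngrams_list : List (List String)) (out : List Int) : Prop := out = rollinghash_text_alt ngrams_list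
instance (ngrams_list : List (List String)) (out : List Int) : Decidable (Spec_rollinghash_text ngrams_list out) := by unfold Spec_rollinghash_text; infer_instance

-- ===== CLAIM (what is proved, stated in full; the proofs are below) =====
def Claim_equal_rollinghash_text : Prop := ∀ (ngrams_list : List (List String)), Dom_rollinghash_text ngrams_list → Spec_rollinghash_text ngrams_list (rollinghash_text ngrams_list)

-- ===== LEMMAS AND PROOFS =====

/-- The polynomial value of a char list, highest-order char first. -/
def polyS : List Char → Int
  | [] => 0
  | c :: l => (c.toNat : Int) * 4 ^ l.length + polyS l

theorem horner_eq_polyS : ∀ (l : List Char) (h : Int),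
    l.foldl (fun hv c => hv * 4 + (c.toNat : Int)) h = h * 4 ^ l.length + polyS l := by
  intro l
  induction l with
  | nil => intro h; simp [polyS]
  | cons c l ih =>
    intro h
    simp only [List.foldl_cons, polyS, List.length_cons, ih (h * 4 + (c.toNat : Int))]
    ring

theorem flat_eq : ∀ (text : List String) (h : Int),
    text.foldl (fun hv w => w.toList.foldl (fun hv c => hv * 4 + (c.toNat : Int)) hv) h
      = (text.flatMap String.toList).foldl (fun hv c => hv * 4 + (c.toNat : Int)) h := by
  intro text
  induction text with
  | nil => intro h; simp
  | cons w t ih => intro h; simp [List.foldl_append, ih]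

theorem polyS_snoc (xs : List Char) (c : Char) :
    polyS (xs ++ [c]) = 4 * polyS xs + (c.toNat : Int) := by
  induction xs with
  | nil => simp [polyS]
  | cons d xs ih =>
    simp only [List.cons_append, polyS, ih, List.length_append, List.length_cons,
      List.length_nil, pow_succ]
    ring

theorem rev_foldl_eq_polyS : ∀ (m : List Char) (s pw : Int),
    (m.foldl (fun (p : Int × Int) c => (p.1 + (c.toNat : Int) * p.2, p.2 * 4)) (s, pw)).1
      = s + pw * polyS m.reverse := by
  intro m
  induction m with
  | nil => intro s pw; simp [polyS]
  | cons c m ih =>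
    intro s pw
    simp only [List.foldl_cons, ih, List.reverse_cons, polyS_snoc]
    ring

theorem per_text_eq (text : List String) :
    text.foldl (fun hv word =>
        word.toList.foldl (fun hv c => hv * 4 + (c.toNat : Int)) hv) 0
      = ((text.flatMap String.toList).reverse.foldl
          (fun (p : Int × Int) c => (p.1 + (c.toNat : Int) * p.2, p.2 * 4)) (0, 1)).1 := by
  rw [flat_eq, horner_eq_polyS, rev_foldl_eq_polyS]
  simp

theorem foldl_acc_map (l : List (List String)) :
    ∀ acc : List Int,
      l.foldl (fun hash_list text =>
        hash_list ++ [text.foldl (fun hv word =>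
          word.toList.foldl (fun hv c => hv * 4 + (c.toNat : Int)) hv) 0]) acc
      = acc ++ rollinghash_text_alt l := by
  induction l with
  | nil => intro acc; simp [rollinghash_text_alt]
  | cons t l ih =>
    intro acc
    simp only [List.foldl_cons, ih, rollinghash_text_alt, List.map_cons]
    rw [per_text_eq t]
    simp

-- ===== VERDICT (by name: the statement is the Claim_ definition above) =====
theorem rollinghash_text_spec : Claim_equal_rollinghash_text := by
  intro l _
  unfold Spec_rollinghash_text rollinghash_text
  simpa using foldl_acc_map l []
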